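-- pv_equiv track=rewrite | github.com/obonsignour/sam-graf-server | Algorithms/DGTransac/SLPAV2.py | merge_dicts_with_lists
-- ===== SOURCE A (Python) =====
-- def merge_dicts_with_lists(lst):
--     result = {}
--     current = 0
--     for dct in lst:
--         for key, value_list in dct.items():
--             if key not in result:
--                 result[key] = []
--             # Adjust values with the current offset and extend the result list
--             result[key].extend([current + v for v in value_list])
--         # Increment the current counter by the maximum value in the value_list + 1
--         current += max(max(value_list) for value_list in dct.values()) + 1
--     #return dict(sorted(result.items()))
--     return dict(sorted(result.items(), key=lambda item: item[1][0]))
-- ===== SOURCE B (Python) =====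
-- def merge_dicts_with_lists(lst):
--     # Pass 1: prefix-offset table (offs[i] is the offset applied to lst[i]).
--     offs = [0]
--     for dct in lst:
--         offs.append(offs[-1] + max(max(vs) for vs in dct.values()) + 1)
--     # Pass 2: flatten everything into one stream of (key, shifted value) pairs.
--     pairs = [(key, off + v)
--              for off, dct in zip(offs, lst)
--              for key, vs in dct.items()
--              for v in vs]
--     # Group the stream by key, appending one value at a time.
--     result = {}
--     for key, val in pairs:
--         if key in result:
--             result[key].append(val)
--         else:
--             result[key] = [val]
--     return dict(sorted(result.items(), key=lambda item: item[1][0]))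
-- ===== Notes on version B (the rewrite author's own statement) =====
-- stated objective: alternative
-- what changed: B separates the phases A interleaves: it first builds a prefix-offset table, then flattens all dicts into one stream of (key, offset+value) pairs, and groups that stream by single appends, instead of A's running-counter merge with per-key list extends inside the dict loop.
import Mathlib
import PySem

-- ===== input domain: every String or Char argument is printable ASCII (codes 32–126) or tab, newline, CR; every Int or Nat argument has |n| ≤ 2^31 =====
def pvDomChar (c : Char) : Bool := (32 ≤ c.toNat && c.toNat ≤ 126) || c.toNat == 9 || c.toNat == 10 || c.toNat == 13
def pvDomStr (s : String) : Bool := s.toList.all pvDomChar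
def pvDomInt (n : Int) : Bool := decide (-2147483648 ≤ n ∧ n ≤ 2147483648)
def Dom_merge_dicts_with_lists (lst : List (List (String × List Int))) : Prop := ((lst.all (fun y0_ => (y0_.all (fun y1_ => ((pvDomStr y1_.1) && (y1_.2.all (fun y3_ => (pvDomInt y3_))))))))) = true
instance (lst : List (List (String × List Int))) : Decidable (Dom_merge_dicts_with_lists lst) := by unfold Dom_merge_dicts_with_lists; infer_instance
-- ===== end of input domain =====

-- B restructures A's interleaved merge as offset table + flat pair stream + grouping; return values agree on Pre_ (alternative decomposition, no speed claim).

-- ===== PORT A =====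
-- max(max(value_list) for value_list in dct.values()); the .getD 0 only fires where Python raises ValueError (excluded by Pre_)
def pyMaxOfDict (dct : List (String × List Int)) : Int :=
  (PySem.List.max? (dct.map (fun kv => (PySem.List.max? kv.2 (fun v => v)).getD 0)) (fun m => m)).getD 0

def merge_dicts_with_lists (lst : List (List (String × List Int))) : List (String × List Int) :=
  let st := lst.foldl (fun (st : PySem.Dict String (List Int) × Int) dct =>
    (dct.foldl (fun r kv =>
        (if r.contains kv.1 then r else r.insert kv.1 []).modify kv.1 []
          (fun l => l ++ kv.2.map (fun v => st.2 + v))) st.1,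
     st.2 + pyMaxOfDict dct + 1)) (PySem.Dict.empty, 0)
  (PySem.Dict.ofList (PySem.List.sorted st.1.items (fun item => PySem.List.pyGetD item.2 0 0))).items

-- ===== PORT B =====
def merge_dicts_with_lists_alt (lst : List (List (String × List Int))) : List (String × List Int) :=
  let offs := lst.foldl (fun (offs : List Int) dct =>
      offs ++ [PySem.List.pyGetD offs (-1) 0 + pyMaxOfDict dct + 1]) [(0 : Int)]
  let pairs := (offs.zip lst).flatMap (fun od =>
      od.2.flatMap (fun kv => kv.2.map (fun v => (kv.1, od.1 + v))))
  let result := pairs.foldl (fun (r : PySem.Dict String (List Int)) p =>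
      if r.contains p.1 then r.modify p.1 [] (fun l => l ++ [p.2]) else r.insert p.1 [p.2])
    PySem.Dict.empty
  (PySem.Dict.ofList (PySem.List.sorted result.items (fun kv => PySem.List.pyGetD kv.2 0 0))).items

-- ===== PRECONDITION & SPEC =====
-- Pre_ excludes exactly the inputs where Python A raises: an empty dict or an empty value list
-- (ValueError at max); it also rules out the IndexError of the sort key, since then every merged list is nonempty.
def Pre_merge_dicts_with_lists (lst : List (List (String × List Int))) : Prop :=
  (lst.all (fun dct => !dct.isEmpty && dct.all (fun kv => !kv.2.isEmpty))) = true
instance (lst : List (List (String × List Int))) : Decidable (Pre_merge_dicts_with_lists lst) := by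
  unfold Pre_merge_dicts_with_lists; infer_instance

def pvWitness_merge_dicts_with_lists : (List (List (String × List Int))) :=
  [[("a", [0, 1]), ("b", [2])], [("b", [0])]]

def Spec_merge_dicts_with_lists (lst : List (List (String × List Int))) (out : List (String × List Int)) : Prop := out = merge_dicts_with_lists_alt lst
instance (lst : List (List (String × List Int))) (out : List (String × List Int)) : Decidable (Spec_merge_dicts_with_lists lst out) := by unfold Spec_merge_dicts_with_lists; infer_instance

-- ===== CLAIM (what is proved, stated in full; the proofs are below) =====
def Claim_equal_merge_dicts_with_lists : Prop := ∀ (lst : List (List (String × List Int))), Dom_merge_dicts_with_lists lst → Pre_merge_dicts_with_lists lst → Spec_merge_dicts_with_lists lst (merge_dicts_with_lists lst)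

-- ===== LEMMAS AND PROOFS =====

-- the canonical single-pair grouping step both loops reduce to
def pvStepM (r : PySem.Dict String (List Int)) (p : String × Int) : PySem.Dict String (List Int) :=
  r.modify p.1 [] (fun l => l ++ [p.2])

-- per-dict offsets: offsFrom c lst pairs each dict with the offset A uses for it
def pvOffsFrom (c : Int) : List (List (String × List Int)) → List Int
  | [] => []
  | d :: t => c :: pvOffsFrom (c + pyMaxOfDict d + 1) t

def pvTailScan (c : Int) : List (List (String × List Int)) → List Int
  | [] => []
  | d :: t => (c + pyMaxOfDict d + 1) :: pvTailScan (c + pyMaxOfDict d + 1) t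

def pvEndOf (c : Int) : List (List (String × List Int)) → Int
  | [] => c
  | d :: t => pvEndOf (c + pyMaxOfDict d + 1) t

def pvFlatOne (od : Int × List (String × List Int)) : List (String × Int) :=
  od.2.flatMap (fun kv => kv.2.map (fun v => (kv.1, od.1 + v)))

theorem pv_modify_modify {κ ν : Type} [BEq κ] [LawfulBEq κ] (d : PySem.Dict κ ν) (k : κ)
    (dflt dflt' : ν) (f g : ν → ν) :
    (d.modify k dflt f).modify k dflt' g = d.modify k dflt (fun x => g (f x)) := by
  simp only [PySem.Dict.modify, PySem.Dict.getD_insert_self, PySem.Dict.insert_insert_self]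

theorem pv_stepA_eq (r : PySem.Dict String (List Int)) (k : String) (f : List Int → List Int) :
    (if r.contains k then r else r.insert k []).modify k [] f = r.modify k [] f := by
  by_cases h : r.contains k = true
  · simp [h]
  · have hc : r.contains k = false := by simpa using h
    simp only [hc, Bool.false_eq_true, if_false]
    simp only [PySem.Dict.modify, PySem.Dict.getD_insert_self, PySem.Dict.insert_insert_self,
      PySem.Dict.getD_of_not_contains r ([] : List Int) hc]

theorem pv_stepB_eq (r : PySem.Dict String (List Int)) (p : String × Int) :
    (if r.contains p.1 then r.modify p.1 [] (fun l => l ++ [p.2]) else r.insert p.1 [p.2]) = pvStepM r p := by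
  by_cases h : r.contains p.1 = true
  · simp [h, pvStepM]
  · have hc : r.contains p.1 = false := by simpa using h
    simp only [hc, Bool.false_eq_true, if_false, pvStepM, PySem.Dict.modify,
      PySem.Dict.getD_of_not_contains r ([] : List Int) hc]
    simp

theorem pv_extend_eq_foldl (ws : List Int) (k : String) :
    ∀ r : PySem.Dict String (List Int), ws ≠ [] →
    (ws.map (fun w => (k, w))).foldl pvStepM r = r.modify k [] (fun l => l ++ ws) := by
  induction ws with
  | nil => intro r h; exact absurd rfl h
  | cons w wt ih =>
    intro r _
    by_cases hwt : wt = []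
    · subst hwt; simp [pvStepM]
    · simp only [List.map_cons, List.foldl_cons]
      rw [ih (pvStepM r (k, w)) hwt]
      show (r.modify k [] (fun l => l ++ [w])).modify k [] (fun l => l ++ wt) = _
      rw [pv_modify_modify]
      simp

theorem pv_inner_eq (dct : List (String × List Int)) (c : Int)
    (h : ∀ kv ∈ dct, kv.2 ≠ []) :
    ∀ r : PySem.Dict String (List Int),
    dct.foldl (fun r kv => r.modify kv.1 [] (fun l => l ++ kv.2.map (fun v => c + v))) r
      = (pvFlatOne (c, dct)).foldl pvStepM r := by
  induction dct with
  | nil => intro r; rfl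
  | cons kv t ih =>
    intro r
    simp only [List.foldl_cons, pvFlatOne, List.flatMap_cons, List.foldl_append]
    rw [ih (fun x hx => h x (List.mem_cons_of_mem _ hx))]
    congr 1
    have hne : kv.2.map (fun v => c + v) ≠ [] := by
      simpa using h kv (List.mem_cons_self)
    have := pv_extend_eq_foldl (kv.2.map (fun v => c + v)) kv.1 r hne
    rw [← this, List.map_map]
    rfl

theorem pv_A_fold (lst : List (List (String × List Int)))
    (h : ∀ dct ∈ lst, ∀ kv ∈ dct, kv.2 ≠ []) :
    ∀ (r : PySem.Dict String (List Int)) (c : Int),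
    (lst.foldl (fun (st : PySem.Dict String (List Int) × Int) dct =>
      (dct.foldl (fun r kv =>
          (if r.contains kv.1 then r else r.insert kv.1 []).modify kv.1 []
            (fun l => l ++ kv.2.map (fun v => st.2 + v))) st.1,
       st.2 + pyMaxOfDict dct + 1)) (r, c)).1
      = (((pvOffsFrom c lst).zip lst).flatMap pvFlatOne).foldl pvStepM r := by
  induction lst with
  | nil => intro r c; rfl
  | cons d t ih =>
    intro r c
    simp only [List.foldl_cons, pvOffsFrom, List.zip_cons_cons, List.flatMap_cons,
      List.foldl_append]
    rw [ih (fun x hx => h x (List.mem_cons_of_mem _ hx))]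
    congr 1
    have hstep : (fun (r : PySem.Dict String (List Int)) (kv : String × List Int) =>
        (if r.contains kv.1 then r else r.insert kv.1 []).modify kv.1 []
          (fun l => l ++ kv.2.map (fun v => c + v)))
        = (fun r kv => r.modify kv.1 [] (fun l => l ++ kv.2.map (fun v => c + v))) := by
      funext r kv; exact pv_stepA_eq r kv.1 _
    rw [hstep, pv_inner_eq d c (h d List.mem_cons_self) r]

theorem pv_offs_fold (lst : List (List (String × List Int))) :
    ∀ (acc : List Int) (x : Int),
    lst.foldl (fun offs dct => offs ++ [PySem.List.pyGetD offs (-1) 0 + pyMaxOfDict dct + 1]) (acc ++ [x])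
      = (acc ++ [x]) ++ pvTailScan x lst := by
  induction lst with
  | nil => intro acc x; simp [pvTailScan]
  | cons d t ih =>
    intro acc x
    simp only [List.foldl_cons, PySem.List.pyGetD_neg_one_append_singleton]
    rw [List.append_assoc acc [x] _, ← List.append_assoc acc]
    rw [ih (acc ++ [x]) (x + pyMaxOfDict d + 1)]
    simp [pvTailScan]

theorem pv_consScan (lst : List (List (String × List Int))) :
    ∀ c : Int, c :: pvTailScan c lst = pvOffsFrom c lst ++ [pvEndOf c lst] := by
  induction lst with
  | nil => intro c; rfl
  | cons d t ih =>
    intro c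
    simp only [pvTailScan, pvOffsFrom, pvEndOf, List.cons_append]
    rw [← ih]

theorem pv_offsFrom_length (lst : List (List (String × List Int))) :
    ∀ c : Int, (pvOffsFrom c lst).length = lst.length := by
  induction lst with
  | nil => intro c; rfl
  | cons d t ih => intro c; simp [pvOffsFrom, ih]

theorem pv_zip_trunc {α : Type} (l : List α) :
    ∀ (xs : List Int) (y : Int), l.length ≤ xs.length → (xs ++ [y]).zip l = xs.zip l := by
  induction l with
  | nil => intro xs y _; simp
  | cons a t ih =>
    intro xs y h
    cases xs with
    | nil => simp at h
    | cons x xt =>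
      simp only [List.cons_append, List.zip_cons_cons]
      rw [ih xt y (by simpa using h)]

theorem merge_dicts_with_lists_eq (lst : List (List (String × List Int)))
    (h : ∀ dct ∈ lst, ∀ kv ∈ dct, kv.2 ≠ []) :
    merge_dicts_with_lists lst = merge_dicts_with_lists_alt lst := by
  unfold merge_dicts_with_lists merge_dicts_with_lists_alt
  have hA := pv_A_fold lst h PySem.Dict.empty 0
  have hoffs : lst.foldl (fun offs dct => offs ++ [PySem.List.pyGetD offs (-1) 0 + pyMaxOfDict dct + 1]) [(0 : Int)]
      = pvOffsFrom 0 lst ++ [pvEndOf 0 lst] := by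
    have := pv_offs_fold lst [] 0
    simpa [pv_consScan lst 0] using this
  have hzip : ((pvOffsFrom 0 lst ++ [pvEndOf 0 lst]).zip lst) = (pvOffsFrom 0 lst).zip lst :=
    pv_zip_trunc lst (pvOffsFrom 0 lst) (pvEndOf 0 lst) (le_of_eq (pv_offsFrom_length lst 0).symm)
  have hstepB : (fun (r : PySem.Dict String (List Int)) (p : String × Int) =>
      if r.contains p.1 then r.modify p.1 [] (fun l => l ++ [p.2]) else r.insert p.1 [p.2]) = pvStepM := by
    funext r p; exact pv_stepB_eq r p
  have hflat : (fun (od : Int × List (String × List Int)) =>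
      od.2.flatMap (fun kv => kv.2.map (fun v => (kv.1, od.1 + v)))) = pvFlatOne := by
    funext od; rfl
  simp only [hoffs, hzip, hstepB, hflat, hA]

-- ===== VERDICT (by name: the statement is the Claim_ definition above) =====
theorem merge_dicts_with_lists_spec : Claim_equal_merge_dicts_with_lists := by
  intro lst _ hpre
  unfold Spec_merge_dicts_with_lists
  refine (merge_dicts_with_lists_eq lst ?_).symm.symm
  intro dct hd kv hkv
  have := hpre
  unfold Pre_merge_dicts_with_lists at this
  simp only [List.all_eq_true, Bool.and_eq_true] at this
  have h2 := (this dct hd).2 kv hkv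
  simpa [List.isEmpty_iff] using h2
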